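-- pv_equiv track=rewrite | github.com/muribe0/TDA | TP1/intento1.py | ganaSophi
-- ===== SOURCE A (Python) =====
-- def ganaSophi(monedas):
--     sophi = []
--     mateo = []
--     turno = 0
--     while len(monedas) > 0:
--         # empieza sophi
--
--         if turno % 2 == 0:
--             pos_mayor = -1 if monedas[-1] > monedas[0] else 0
--             sophi.append(monedas.pop(pos_mayor))
--         else:
--             pos_menor = 0 if monedas[-1] > monedas[0] else -1
--             mateo.append(monedas.pop(pos_menor))
--         turno += 1
--     return sophi, sum(sophi), mateo, sum(mateo)
-- ===== SOURCE B (Python) =====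
-- def ganaSophi(monedas):
--     # Two-pointer scan over the fixed list (O(n)); unlike A it does not empty the input list.
--     lo, hi = 0, len(monedas) - 1
--     sophi = []
--     mateo = []
--     sophi_turn = True
--     while lo <= hi:
--         last_bigger = monedas[hi] > monedas[lo]
--         if sophi_turn == last_bigger:
--             picked = monedas[hi]
--             hi -= 1
--         else:
--             picked = monedas[lo]
--             lo += 1
--         if sophi_turn:
--             sophi.append(picked)
--         else:
--             mateo.append(picked)
--         sophi_turn = not sophi_turn
--     return sophi, sum(sophi), mateo, sum(mateo)
-- ===== Notes on version B (the rewrite author's own statement) =====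
-- stated objective: faster
-- what changed: Replaced the destructive pop(0)/pop(-1) loop with a two-pointer scan over the fixed list, so no element shifting occurs (and the input list is no longer emptied).
import Mathlib
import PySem

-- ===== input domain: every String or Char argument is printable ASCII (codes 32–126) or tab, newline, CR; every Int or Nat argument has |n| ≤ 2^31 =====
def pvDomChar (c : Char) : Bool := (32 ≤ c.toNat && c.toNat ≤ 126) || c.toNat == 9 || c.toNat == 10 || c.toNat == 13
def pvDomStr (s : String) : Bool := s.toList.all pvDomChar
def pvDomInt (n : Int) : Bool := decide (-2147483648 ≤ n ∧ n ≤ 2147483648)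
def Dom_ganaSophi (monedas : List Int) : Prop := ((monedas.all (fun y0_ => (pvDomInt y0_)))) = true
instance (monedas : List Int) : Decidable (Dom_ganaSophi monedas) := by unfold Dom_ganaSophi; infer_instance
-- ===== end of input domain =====

-- B replaces A's destructive pop(0)/pop(-1) loop by a two-pointer scan over the fixed list
-- (A mutates its Python argument in place, emptying it; the equivalence proved is about the return value).
-- ===== PORT A =====
-- NOTE: Python A empties its argument list in place via pop(); the equivalence here is about the return value only.
-- while len(monedas) > 0: pick from an end (pop(-1) = dropLast+getLast, pop(0) = tail+head), alternating by turno parity.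
def ganaSophiLoop : List Int → Int → List Int → List Int → List Int × List Int
  | [], _, sophi, mateo => (sophi, mateo)
  | h :: t, turno, sophi, mateo =>
    if turno % 2 == 0 then
      -- pos_mayor = -1 if monedas[-1] > monedas[0] else 0 ; sophi.append(monedas.pop(pos_mayor))
      if (h :: t).getLast (by simp) > h then
        ganaSophiLoop (h :: t).dropLast (turno + 1) (sophi ++ [(h :: t).getLast (by simp)]) mateo
      else
        ganaSophiLoop t (turno + 1) (sophi ++ [h]) mateo
    else
      -- pos_menor = 0 if monedas[-1] > monedas[0] else -1 ; mateo.append(monedas.pop(pos_menor))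
      if (h :: t).getLast (by simp) > h then
        ganaSophiLoop t (turno + 1) sophi (mateo ++ [h])
      else
        ganaSophiLoop (h :: t).dropLast (turno + 1) sophi (mateo ++ [(h :: t).getLast (by simp)])
  termination_by m _ _ _ => m.length
  decreasing_by all_goals simp [List.length_dropLast]

def ganaSophi (monedas : List Int) : List Int × Int × List Int × Int :=
  let r := ganaSophiLoop monedas 0 [] []
  (r.1, r.1.sum, r.2, r.2.sum)

-- ===== PORT B =====
-- two-pointer loop of Source B; indices lo, hi always in range while lo ≤ hi, so getD's default is never used
def ganaSophiAltLoop (monedas : List Int) (lo hi : Int) (sophi mateo : List Int) (sophiTurn : Bool) :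
    List Int × List Int :=
  if lo ≤ hi then
    let lastBigger : Bool := decide (monedas.getD hi.toNat 0 > monedas.getD lo.toNat 0)
    if sophiTurn == lastBigger then
      if sophiTurn then
        ganaSophiAltLoop monedas lo (hi - 1) (sophi ++ [monedas.getD hi.toNat 0]) mateo false
      else
        ganaSophiAltLoop monedas lo (hi - 1) sophi (mateo ++ [monedas.getD hi.toNat 0]) true
    else
      if sophiTurn then
        ganaSophiAltLoop monedas (lo + 1) hi (sophi ++ [monedas.getD lo.toNat 0]) mateo false
      else
        ganaSophiAltLoop monedas (lo + 1) hi sophi (mateo ++ [monedas.getD lo.toNat 0]) true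
  else (sophi, mateo)
  termination_by (hi + 1 - lo).toNat
  decreasing_by all_goals omega

def ganaSophi_alt (monedas : List Int) : List Int × Int × List Int × Int :=
  let r := ganaSophiAltLoop monedas 0 ((monedas.length : Int) - 1) [] [] true
  (r.1, r.1.sum, r.2, r.2.sum)

-- ===== PRECONDITION & SPEC =====
def Spec_ganaSophi (monedas : List Int) (out : List Int × Int × List Int × Int) : Prop := out = ganaSophi_alt monedas
instance (monedas : List Int) (out : List Int × Int × List Int × Int) : Decidable (Spec_ganaSophi monedas out) := by unfold Spec_ganaSophi; infer_instance

-- ===== CLAIM (what is proved, stated in full; the proofs are below) =====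
def Claim_equal_ganaSophi : Prop := ∀ (monedas : List Int), Dom_ganaSophi monedas → Spec_ganaSophi monedas (ganaSophi monedas)

-- ===== LEMMAS AND PROOFS =====

-- the window m[lo..hi] that B's pointers delimit, as the list A's destructive loop still holds
def pvWindow (m : List Int) (lo : Int) (n : Nat) : List Int := (m.drop lo.toNat).take n

lemma pvTakeDropGetLast (l : List Int) (a k : Nat) (h : a + k < l.length)
    (hne : (l.drop a).take (k + 1) ≠ []) :
    ((l.drop a).take (k + 1)).getLast hne = l[a + k]'h := by
  rw [List.getLast_eq_getElem]
  rw [getElem_congr_idx (by simp; omega : ((l.drop a).take (k + 1)).length - 1 = k)]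
  rw [List.getElem_take, List.getElem_drop]

lemma pvLoop_eq (m : List Int) :
    ∀ (n : Nat) (lo hi turno : Int) (sophi mateo : List Int),
      0 ≤ lo → hi < (m.length : Int) → (hi + 1 - lo).toNat = n →
      ganaSophiAltLoop m lo hi sophi mateo (turno % 2 == 0) =
        ganaSophiLoop (pvWindow m lo n) turno sophi mateo := by
  intro n
  induction n with
  | zero =>
    intro lo hi turno sophi mateo hlo hhi hn
    have h : ¬ lo ≤ hi := by omega
    rw [ganaSophiAltLoop]
    simp [h, pvWindow, ganaSophiLoop]
  | succ n ih =>
    intro lo hi turno sophi mateo hlo hhi hn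
    have hle : lo ≤ hi := by omega
    have ha : lo.toNat < m.length := by omega
    have hb : hi.toNat < m.length := by omega
    have hab : lo.toNat + n = hi.toNat := by omega
    have h1 : (lo + 1).toNat = lo.toNat + 1 := by omega
    have hw : pvWindow m lo (n + 1) = m[lo.toNat] :: pvWindow m (lo + 1) n := by
      rw [pvWindow, pvWindow, ← List.getElem_cons_drop ha, List.take_succ_cons, h1]
    have hlast : ∀ (hx : (m[lo.toNat] :: pvWindow m (lo + 1) n) ≠ []),
        (m[lo.toNat] :: pvWindow m (lo + 1) n).getLast hx = m[hi.toNat] := by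
      rw [← hw]
      intro hx
      exact (pvTakeDropGetLast m lo.toNat n (by omega) hx).trans (getElem_congr_idx hab)
    have hdropLast : (m[lo.toNat] :: pvWindow m (lo + 1) n).dropLast = pvWindow m lo n := by
      rw [← hw]
      show ((m.drop lo.toNat).take (n + 1)).dropLast = (m.drop lo.toNat).take n
      rw [List.dropLast_eq_take]
      simp [List.take_take]
      omega
    have hsLo : m[lo.toNat]? = some m[lo.toNat] := List.getElem?_eq_getElem ha
    have hsHi : m[hi.toNat]? = some m[hi.toNat] := List.getElem?_eq_getElem hb
    by_cases hp : turno % 2 = 0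
    · have hT : (turno % 2 == 0) = true := by simp [hp]
      have hT1 : ((turno + 1) % 2 == 0) = false := by
        simp only [beq_eq_false_iff_ne, ne_eq]; omega
      by_cases hLB : m[hi.toNat] > m[lo.toNat]
      · -- Sophi's turn, last element bigger: both take the last element
        rw [ganaSophiAltLoop, hw]
        simp only [ganaSophiLoop]
        simp [hle, hsLo, hsHi, hT, hlast, hdropLast, hLB]
        rw [← hT1]
        exact ih lo (hi - 1) (turno + 1) _ _ hlo (by omega) (by omega)
      · -- Sophi's turn, first element at least as big: both take the first element
        rw [ganaSophiAltLoop, hw]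
        simp only [ganaSophiLoop]
        simp [hle, hsLo, hsHi, hT, hlast, hLB]
        rw [← hT1]
        exact ih (lo + 1) hi (turno + 1) _ _ (by omega) hhi (by omega)
    · have hT : (turno % 2 == 0) = false := by
        simp only [beq_eq_false_iff_ne, ne_eq]; omega
      have hT1 : ((turno + 1) % 2 == 0) = true := by
        simp only [beq_iff_eq]; omega
      by_cases hLB : m[hi.toNat] > m[lo.toNat]
      · -- Mateo's turn, last element bigger: both take the first element
        rw [ganaSophiAltLoop, hw]
        simp only [ganaSophiLoop]
        simp [hle, hsLo, hsHi, hT, hlast, hLB]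
        rw [← hT1]
        exact ih (lo + 1) hi (turno + 1) _ _ (by omega) hhi (by omega)
      · -- Mateo's turn, first element at least as big: both take the last element
        rw [ganaSophiAltLoop, hw]
        simp only [ganaSophiLoop]
        simp [hle, hsLo, hsHi, hT, hlast, hdropLast, hLB]
        rw [← hT1]
        exact ih lo (hi - 1) (turno + 1) _ _ hlo (by omega) (by omega)

lemma pvTop_eq (m : List Int) :
    ganaSophiAltLoop m 0 ((m.length : Int) - 1) [] [] true = ganaSophiLoop m 0 [] [] := by
  have h := pvLoop_eq m m.length 0 ((m.length : Int) - 1) 0 [] [] (by omega) (by omega) (by omega)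
  simpa [pvWindow] using h

-- ===== VERDICT (by name: the statement is the Claim_ definition above) =====
theorem ganaSophi_spec : Claim_equal_ganaSophi := by
  intro m _
  unfold Spec_ganaSophi ganaSophi ganaSophi_alt
  rw [pvTop_eq]
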